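-- pv_equiv track=rewrite | github.com/DaviKHub/InterpretedLanguage | lab3.py | sort_string_func1
-- ===== SOURCE A (Python) =====
-- def sort_string_func1(strings_array):
--     def char_frequency(string):
--         dictionary = {}
--         for char in string:
--             dictionary[char] = dictionary.get(char, 0) + 1
--         return dictionary
--     sorted_strings = sorted(strings_array, key=lambda x: (lambda freq: max(freq.values()) - min(freq.values()))(char_frequency(x)))
--     return sorted_strings
-- ===== SOURCE B (Python) =====
-- def sort_string_func1(strings_array):
--     # Key: sort the string's characters, collect run lengths of equal
--     # consecutive characters, return max(run lengths) - min(run lengths).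
--     def spread(string):
--         counts = []
--         prev = None
--         run = 0
--         for ch in sorted(string):
--             if ch == prev:
--                 run += 1
--             else:
--                 if prev is not None:
--                     counts.append(run)
--                 prev = ch
--                 run = 1
--         if prev is not None:
--             counts.append(run)
--         return max(counts) - min(counts)
--     return sorted(strings_array, key=spread)
-- ===== Notes on version B (the rewrite author's own statement) =====
-- stated objective: alternative
-- what changed: The per-string key is computed by sorting the string's characters and scanning for run lengths of equal consecutive characters instead of building a hash-based frequency dict; max-min of the same multiset of counts gives the same key, so the stable sort is unchanged.
import Mathlib
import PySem

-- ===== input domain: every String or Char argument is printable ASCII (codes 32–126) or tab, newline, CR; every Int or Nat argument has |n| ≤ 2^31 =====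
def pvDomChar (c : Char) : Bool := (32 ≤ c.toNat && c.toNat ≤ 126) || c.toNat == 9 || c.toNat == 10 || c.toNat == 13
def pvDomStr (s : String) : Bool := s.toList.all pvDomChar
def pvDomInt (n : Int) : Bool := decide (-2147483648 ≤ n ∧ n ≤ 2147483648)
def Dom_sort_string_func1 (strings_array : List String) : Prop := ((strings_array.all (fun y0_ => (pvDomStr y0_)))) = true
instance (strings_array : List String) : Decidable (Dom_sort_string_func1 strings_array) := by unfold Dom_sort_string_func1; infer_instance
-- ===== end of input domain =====

-- B replaces A's hash-based per-string frequency dict by a sort-then-run-length scan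
-- producing the same multiset of character counts (objective: alternative, same result).

-- ===== PORT A =====
-- char_frequency(string): dict built with dictionary.get(char, 0) + 1
def pvCharFreq (s : List Char) : PySem.Dict Char Int :=
  s.foldl (fun d c => d.insert c (d.getD c 0 + 1)) PySem.Dict.empty

-- key = max(freq.values()) - min(freq.values()); Python raises ValueError on an empty
-- string (empty values()), which Pre_ excludes; the port totalizes with .getD 0 there.
def pvKeyA (x : String) : Int :=
  (PySem.List.max? (pvCharFreq x.toList).values (fun v => v)).getD 0
    - (PySem.List.min? (pvCharFreq x.toList).values (fun v => v)).getD 0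

def sort_string_func1 (strings_array : List String) : List String :=
  PySem.List.sorted strings_array pvKeyA false

-- ===== PORT B =====
-- one step of B's loop over the sorted characters; state = (counts, prev, run)
def pvRunStep (st : List Int × Option Char × Int) (ch : Char) : List Int × Option Char × Int :=
  match st with
  | (counts, prev, run) =>
    if prev = some ch then (counts, prev, run + 1)
    else ((match prev with | some _ => counts ++ [run] | none => counts), some ch, 1)

-- the trailing 'if prev is not None: counts.append(run)'
def pvFinish (st : List Int × Option Char × Int) : List Int :=
  match st.2.1 with
  | some _ => st.1 ++ [st.2.2]
  | none => st.1

-- spread(string): run lengths of equal consecutive chars of sorted(string)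
def pvKeyB (x : String) : Int :=
  let counts := pvFinish ((PySem.List.sorted x.toList (fun c => c) false).foldl pvRunStep ([], none, 0))
  (PySem.List.max? counts (fun v => v)).getD 0 - (PySem.List.min? counts (fun v => v)).getD 0

def sort_string_func1_alt (strings_array : List String) : List String :=
  PySem.List.sorted strings_array pvKeyB false

-- ===== PRECONDITION & SPEC =====
-- Pre_ excludes lists containing an empty string: there both Pythons raise
-- ValueError (max() of an empty sequence).
def Pre_sort_string_func1 (strings_array : List String) : Prop :=
  ∀ s ∈ strings_array, s.toList ≠ []
instance (strings_array : List String) : Decidable (Pre_sort_string_func1 strings_array) := by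
  unfold Pre_sort_string_func1; infer_instance

def pvWitness_sort_string_func1 : List String := ["abb", "ab", "xzx "]

def Spec_sort_string_func1 (strings_array : List String) (out : List String) : Prop := out = sort_string_func1_alt strings_array
instance (strings_array : List String) (out : List String) : Decidable (Spec_sort_string_func1 strings_array out) := by unfold Spec_sort_string_func1; infer_instance

-- ===== CLAIM (what is proved, stated in full; the proofs are below) =====
def Claim_equal_sort_string_func1 : Prop := ∀ (strings_array : List String), Dom_sort_string_func1 strings_array → Pre_sort_string_func1 strings_array → Spec_sort_string_func1 strings_array (sort_string_func1 strings_array)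

-- ===== LEMMAS AND PROOFS =====

-- proof-side recursive description of B's run-length loop
def pvRcGo (cur : Char) (n : Int) : List Char → List Int
  | [] => [n]
  | x :: xs => if x = cur then pvRcGo cur (n + 1) xs else n :: pvRcGo x 1 xs

def pvRc : List Char → List Int
  | [] => []
  | c :: rest => pvRcGo c 1 rest

theorem pvFold_go (xs : List Char) : ∀ (counts : List Int) (cur : Char) (n : Int),
    pvFinish (xs.foldl pvRunStep (counts, some cur, n)) = counts ++ pvRcGo cur n xs := by
  induction xs with
  | nil => intro counts cur n; simp [pvFinish, pvRcGo]
  | cons x xs ih =>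
    intro counts cur n
    by_cases h : x = cur
    · subst h
      simp [List.foldl_cons, pvRunStep, ih, pvRcGo]
    · have hne : ¬ (some cur = some x) := by
        simp only [Option.some.injEq]
        exact fun e => h e.symm
      simp only [List.foldl_cons, pvRunStep, if_neg hne, ih, pvRcGo, if_neg h,
        List.append_assoc, List.singleton_append]

theorem pvFold_rc (cs : List Char) :
    pvFinish (cs.foldl pvRunStep ([], none, 0)) = pvRc cs := by
  cases cs with
  | nil => simp [pvFinish, pvRc]
  | cons c rest =>
    simp only [List.foldl_cons, pvRunStep, reduceCtorEq]
    simpa [pvRc] using pvFold_go rest [] c 1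

theorem pvRcGo_sorted (xs : List Char) : ∀ (cur : Char) (n : Int),
    (cur :: xs).Pairwise (· ≤ ·) →
    pvRcGo cur n xs = (n + xs.count cur) :: pvRc (xs.dropWhile (· == cur)) := by
  induction xs with
  | nil => intro cur n _; simp [pvRcGo, pvRc]
  | cons x xs ih =>
    intro cur n h
    by_cases hx : x = cur
    · subst hx
      have h' : (x :: xs).Pairwise (· ≤ ·) := h.of_cons
      have := ih x (n + 1) h'
      simp only [pvRcGo, this, List.count_cons_self, List.dropWhile_cons,
        BEq.rfl, if_pos]
      congr 1
      push_cast; ring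
    · have hcx : cur ≤ x := (List.pairwise_cons.mp h).1 x (by simp)
      have hxxs : ∀ y ∈ xs, x ≤ y := (List.pairwise_cons.mp h.of_cons).1
      have hnot : cur ∉ x :: xs := by
        intro hc
        rcases List.mem_cons.mp hc with e | hc
        · exact hx e.symm
        · exact hx (le_antisymm (hxxs cur hc) hcx)
      have hcount : (x :: xs).count cur = 0 := List.count_eq_zero_of_not_mem hnot
      have hdrop : (x :: xs).dropWhile (· == cur) = x :: xs := by
        simp [hx]
      simp [pvRcGo, if_neg hx, hcount, hdrop, pvRc]

theorem pvTakeWhile_count (rest : List Char) (c d : Char) (hdc : d ≠ c) :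
    rest.count d = (rest.dropWhile (· == c)).count d := by
  conv_lhs => rw [← List.takeWhile_append_dropWhile (p := (· == c)) (l := rest)]
  rw [List.count_append]
  have : (rest.takeWhile (· == c)).count d = 0 := by
    apply List.count_eq_zero_of_not_mem
    intro hmem
    exact hdc (by simpa using List.mem_takeWhile_imp hmem)
  omega

theorem pvNotMem_dropWhile (rest : List Char) (c : Char)
    (h : (c :: rest).Pairwise (· ≤ ·)) : c ∉ rest.dropWhile (· == c) := by
  intro hc
  have hle : ∀ y ∈ rest, c ≤ y := (List.pairwise_cons.mp h).1
  have hpw : (rest.dropWhile (· == c)).Pairwise (· ≤ ·) :=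
    h.of_cons.sublist (List.dropWhile_sublist _)
  cases hd : rest.dropWhile (· == c) with
  | nil => rw [hd] at hc; simp at hc
  | cons x t =>
    have hx' : x ≠ c := by
      have hh := List.head?_dropWhile_not (· == c) rest
      rw [hd] at hh; simpa using hh
    rw [hd] at hc hpw
    rcases List.mem_cons.mp hc with e | hmem
    · exact hx' e.symm
    · have hxc : x ≤ c := (List.pairwise_cons.mp hpw).1 c hmem
      have hcx : c ≤ x :=
        hle x ((List.dropWhile_sublist (· == c)).subset (by rw [hd]; simp))
      exact hx' (le_antisymm hxc hcx)

theorem pvMemRest_iff (rest : List Char) (c : Char) (a : Char) :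
    (a ∈ rest ↔ a = c ∧ (rest.takeWhile (· == c)) ≠ [] ∨ a ∈ rest.dropWhile (· == c)) := by
  constructor
  · intro ha
    conv at ha => rw [← List.takeWhile_append_dropWhile (p := (· == c)) (l := rest)]
    rcases List.mem_append.mp ha with h | h
    · left
      refine ⟨by simpa using List.mem_takeWhile_imp h, ?_⟩
      intro e; rw [e] at h; exact absurd h (List.not_mem_nil)
    · right; exact h
  · rintro (⟨e, hne⟩ | h)
    · cases ht : rest.takeWhile (· == c) with
      | nil => exact absurd ht hne
      | cons y t =>
        have hy : y = c := by
          have hmem : y ∈ rest.takeWhile (· == c) := by rw [ht]; simp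
          simpa using List.mem_takeWhile_imp hmem
        have hr : y ∈ rest := (List.takeWhile_sublist (· == c)).subset (by rw [ht]; simp)
        rw [e, ← hy]; exact hr
    · exact (List.dropWhile_sublist (· == c)).subset h

theorem pvRc_perm : ∀ (k : Nat) (cs : List Char), cs.length ≤ k → cs.Pairwise (· ≤ ·) →
    (pvRc cs).Perm ((PySem.Set.ofList cs).map (fun c => (cs.count c : Int))) := by
  intro k
  induction k with
  | zero =>
    intro cs hlen _
    have : cs = [] := List.eq_nil_of_length_eq_zero (Nat.le_zero.mp hlen)
    subst this; simp [pvRc, PySem.Set.ofList]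
  | succ k ih =>
    intro cs hlen h
    cases cs with
    | nil => simp [pvRc, PySem.Set.ofList]
    | cons c rest =>
      set rest' := rest.dropWhile (· == c) with hrest'
      have hpwrest : rest.Pairwise (· ≤ ·) := h.of_cons
      have hpw' : rest'.Pairwise (· ≤ ·) := hpwrest.sublist (List.dropWhile_sublist _)
      have hlen' : rest'.length ≤ k := by
        have h1 : rest'.length ≤ rest.length := (List.dropWhile_sublist _).length_le
        have h2 : rest.length ≤ k := by simpa using Nat.lt_succ_iff.mp (Nat.lt_of_lt_of_le (by simp) hlen)
        omega
      have hIH := ih rest' hlen' hpw'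
      have hnotc : c ∉ rest' := pvNotMem_dropWhile rest c h
      -- rc (c :: rest) = count c :: rc rest'
      have hrc : pvRc (c :: rest) = (((c :: rest).count c : Int)) :: pvRc rest' := by
        have := pvRcGo_sorted rest c 1 h
        simp only [pvRc, this, List.count_cons_self, hrest']
        congr 1
        push_cast; ring
      -- counts agree on rest'
      have hcounts : ∀ d ∈ PySem.Set.ofList rest', (rest'.count d : Int) = ((c :: rest).count d : Int) := by
        intro d hd0
        have hd : d ∈ rest' := (PySem.Set.mem_ofList _ _).mp hd0
        have hdc : d ≠ c := fun e => hnotc (e ▸ hd)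
        have hcc : List.count d (c :: rest) = List.count d rest := by
          simp [Ne.symm hdc]
        rw [hcc, pvTakeWhile_count rest c d hdc]
      -- Set.ofList (c :: rest) is a permutation of c :: Set.ofList rest'
      have hsetperm : (PySem.Set.ofList (c :: rest) : List Char).Perm (c :: PySem.Set.ofList rest') := by
        rw [List.perm_ext_iff_of_nodup (PySem.Set.nodup_ofList _)
          (by simp only [List.nodup_cons]
              exact ⟨fun hm => hnotc ((PySem.Set.mem_ofList _ _).mp hm), PySem.Set.nodup_ofList _⟩)]
        intro a
        rw [PySem.Set.mem_ofList, List.mem_cons, List.mem_cons, PySem.Set.mem_ofList]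
        constructor
        · rintro (e | ha)
          · exact Or.inl e
          · rcases (pvMemRest_iff rest c a).mp ha with ⟨e, _⟩ | hmem
            · exact Or.inl e
            · exact Or.inr hmem
        · rintro (e | ha)
          · exact Or.inl e
          · exact Or.inr ((List.dropWhile_sublist (· == c)).subset ha)
      rw [hrc]
      have h2 : (pvRc rest').Perm
          ((PySem.Set.ofList rest').map (fun d => ((c :: rest).count d : Int))) := by
        rw [← List.map_congr_left hcounts]
        exact hIH
      have h3 := List.Perm.cons (((c :: rest).count c : Int)) h2
      have h4 : ((c :: PySem.Set.ofList rest').map (fun d => ((c :: rest).count d : Int))).Perm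
          ((PySem.Set.ofList (c :: rest)).map (fun d => ((c :: rest).count d : Int))) :=
        (hsetperm.map _).symm
      exact h3.trans (by simpa using h4)

-- max/min values are invariant under permutation (Int lists, identity key)
theorem pvMax_perm (xs ys : List Int) (h : xs.Perm ys) :
    (PySem.List.max? xs (fun v => v)).getD 0 = (PySem.List.max? ys (fun v => v)).getD 0 := by
  cases hy : PySem.List.max? ys (fun v => v) with
  | none =>
    have hys : ys = [] := (PySem.List.max?_eq_none_iff ys _).mp hy
    subst hys
    have hxs : xs = [] := by
      have hl := h.length_eq
      simpa [List.length_eq_zero_iff] using hl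
    subst hxs; rfl
  | some m' =>
    cases hx : PySem.List.max? xs (fun v => v) with
    | none =>
      have hxs : xs = [] := (PySem.List.max?_eq_none_iff xs _).mp hx
      subst hxs
      have hys : ys = [] := by
        have hl := h.length_eq
        simpa [List.length_eq_zero_iff, eq_comm] using hl
      subst hys
      have hn : PySem.List.max? ([] : List Int) (fun v => v) = none :=
        (PySem.List.max?_eq_none_iff [] _).mpr rfl
      rw [hn] at hy
      exact absurd hy (by simp)
    | some m =>
      have h1 : m ≤ m' := PySem.List.max?_isMax hy m (h.mem_iff.mp (PySem.List.max?_mem hx))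
      have h2 : m' ≤ m := PySem.List.max?_isMax hx m' (h.mem_iff.mpr (PySem.List.max?_mem hy))
      simp [le_antisymm h1 h2]

theorem pvMin_perm (xs ys : List Int) (h : xs.Perm ys) :
    (PySem.List.min? xs (fun v => v)).getD 0 = (PySem.List.min? ys (fun v => v)).getD 0 := by
  cases hy : PySem.List.min? ys (fun v => v) with
  | none =>
    have hys : ys = [] := (PySem.List.min?_eq_none_iff ys _).mp hy
    subst hys
    have hxs : xs = [] := by
      have hl := h.length_eq
      simpa [List.length_eq_zero_iff] using hl
    subst hxs; rfl
  | some m' =>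
    cases hx : PySem.List.min? xs (fun v => v) with
    | none =>
      have hxs : xs = [] := (PySem.List.min?_eq_none_iff xs _).mp hx
      subst hxs
      have hys : ys = [] := by
        have hl := h.length_eq
        simpa [List.length_eq_zero_iff, eq_comm] using hl
      subst hys
      have hn : PySem.List.min? ([] : List Int) (fun v => v) = none :=
        (PySem.List.min?_eq_none_iff [] _).mpr rfl
      rw [hn] at hy
      exact absurd hy (by simp)
    | some m =>
      have h1 : m' ≤ m := PySem.List.min?_isMin hy m (h.mem_iff.mp (PySem.List.min?_mem hx))
      have h2 : m ≤ m' := PySem.List.min?_isMin hx m' (h.mem_iff.mpr (PySem.List.min?_mem hy))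
      simp [le_antisymm h2 h1]

-- A's dict values are exactly the counts over the distinct characters
theorem pvValuesA (cs : List Char) :
    (pvCharFreq cs).values = (PySem.Set.ofList cs).map (fun c => (cs.count c : Int)) := by
  unfold pvCharFreq
  rw [PySem.Dict.foldl_insert_getD_add_one_eq_counter]
  show (PySem.Dict.counter cs).items.map (·.2) = _
  rw [PySem.Dict.items_counter]
  simp

-- B's run-length counts are a permutation of A's dict values
theorem pvCountsB_perm (cs : List Char) :
    (pvFinish ((PySem.List.sorted cs (fun c => c) false).foldl pvRunStep ([], none, 0))).Perm
      ((PySem.Set.ofList cs).map (fun c => (cs.count c : Int))) := by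
  set scs := PySem.List.sorted cs (fun c => c) false with hscs
  have hperm : scs.Perm cs := PySem.List.sorted_perm cs _ false
  have hpw : scs.Pairwise (· ≤ ·) := PySem.List.sorted_pairwise cs (fun c => c)
  rw [pvFold_rc]
  have h1 := pvRc_perm scs.length scs le_rfl hpw
  have hcnt : ∀ d ∈ PySem.Set.ofList scs, (scs.count d : Int) = (cs.count d : Int) := by
    intro d _
    rw [hperm.count_eq]
  have hset : (PySem.Set.ofList scs : List Char).Perm (PySem.Set.ofList cs) := by
    rw [List.perm_ext_iff_of_nodup (PySem.Set.nodup_ofList _) (PySem.Set.nodup_ofList _)]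
    intro a
    rw [PySem.Set.mem_ofList, PySem.Set.mem_ofList, hperm.mem_iff]
  have h2 : (pvRc scs).Perm ((PySem.Set.ofList scs).map (fun c => (cs.count c : Int))) := by
    rw [← List.map_congr_left hcnt]
    exact h1
  exact h2.trans (hset.map _)

theorem pvKey_eq : pvKeyA = pvKeyB := by
  funext x
  unfold pvKeyA pvKeyB
  have hperm : ((pvCharFreq x.toList).values).Perm
      (pvFinish ((PySem.List.sorted x.toList (fun c => c) false).foldl pvRunStep ([], none, 0))) := by
    rw [pvValuesA]
    exact (pvCountsB_perm x.toList).symm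
  rw [pvMax_perm _ _ hperm, pvMin_perm _ _ hperm]

-- ===== VERDICT (by name: the statement is the Claim_ definition above) =====
theorem sort_string_func1_spec : Claim_equal_sort_string_func1 := by
  intro strings_array _ _
  unfold Spec_sort_string_func1 sort_string_func1 sort_string_func1_alt
  rw [pvKey_eq]
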